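-- pv_equiv track=rewrite | github.com/mejia-b/AI-Opponent-Tic-Tac-Toe | a1_bmejia2022.py | generate_board
-- ===== SOURCE A (Python) =====
-- def generate_board(board_size_x, board_size_y):
--     board = []
--     row = []
--     i = 0
--     for y in range(0, board_size_y):
--         for x in range(0, board_size_x):
--             row.append(str(i))
--             i += 1
--         board.append(row)
--         row = []
--     return board
-- ===== SOURCE B (Python) =====
-- def generate_board(board_size_x, board_size_y):
--     rows = max(board_size_y, 0)
--     cols = max(board_size_x, 0)
--     flat = [str(i) for i in range(rows * cols)]
--     return [flat[r * cols : r * cols + cols] for r in range(rows)]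
-- ===== Notes on version B (the rewrite author's own statement) =====
-- stated objective: alternative
-- what changed: B builds the whole numbered sequence as one flat list and reshapes it into rows by slicing, instead of maintaining a running counter and row accumulator inside nested loops.
import Mathlib
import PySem

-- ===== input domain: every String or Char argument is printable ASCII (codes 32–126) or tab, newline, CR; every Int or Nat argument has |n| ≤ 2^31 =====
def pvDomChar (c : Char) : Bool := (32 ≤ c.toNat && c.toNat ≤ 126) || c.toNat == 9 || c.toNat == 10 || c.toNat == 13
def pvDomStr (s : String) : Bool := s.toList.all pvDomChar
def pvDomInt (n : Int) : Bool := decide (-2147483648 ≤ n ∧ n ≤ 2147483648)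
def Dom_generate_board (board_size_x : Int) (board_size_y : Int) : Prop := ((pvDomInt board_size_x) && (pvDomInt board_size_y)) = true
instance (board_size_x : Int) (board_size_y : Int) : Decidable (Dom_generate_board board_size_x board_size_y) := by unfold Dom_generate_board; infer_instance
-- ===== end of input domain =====

-- B builds the flat numbered list once and reshapes it into rows by slicing,
-- instead of A's nested loops with a running counter; objective: alternative decomposition.

-- ===== PORT A =====
-- nested loops with accumulator state (board, row, i)
def generate_board (board_size_x : Int) (board_size_y : Int) : List (List String) :=
  let s := (PySem.List.pyRange 0 board_size_y 1).foldl
    (fun (st : List (List String) × List String × Int) _y =>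
      let inner := (PySem.List.pyRange 0 board_size_x 1).foldl
        (fun (ri : List String × Int) _x => (ri.1 ++ [PySem.Int.toStr ri.2], ri.2 + 1))
        (st.2.1, st.2.2)
      (st.1 ++ [inner.1], ([] : List String), inner.2))
    ([], [], 0)
  s.1

-- ===== PORT B =====
-- flat numbered list, then rows by slicing
def generate_board_alt (board_size_x : Int) (board_size_y : Int) : List (List String) :=
  let rows := max board_size_y 0
  let cols := max board_size_x 0
  let flat := (PySem.List.pyRange 0 (rows * cols) 1).map PySem.Int.toStr
  (PySem.List.pyRange 0 rows 1).map
    (fun r => PySem.List.slice flat (some (r * cols)) (some (r * cols + cols)))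

-- ===== PRECONDITION & SPEC =====
def Spec_generate_board (board_size_x : Int) (board_size_y : Int) (out : List (List String)) : Prop := out = generate_board_alt board_size_x board_size_y
instance (board_size_x : Int) (board_size_y : Int) (out : List (List String)) : Decidable (Spec_generate_board board_size_x board_size_y out) := by unfold Spec_generate_board; infer_instance

-- ===== CLAIM (what is proved, stated in full; the proofs are below) =====
def Claim_equal_generate_board : Prop := ∀ (board_size_x : Int) (board_size_y : Int), Dom_generate_board board_size_x board_size_y → Spec_generate_board board_size_x board_size_y (generate_board board_size_x board_size_y)

-- ===== LEMMAS AND PROOFS =====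

-- A's loop body as a named helper (definitionally equal to the lambda in the port)
def pvStep (bx : Int) (st : List (List String) × List String × Int) (_y : Int) :
    List (List String) × List String × Int :=
  let inner := (PySem.List.pyRange 0 bx 1).foldl
    (fun (ri : List String × Int) _x => (ri.1 ++ [PySem.Int.toStr ri.2], ri.2 + 1))
    (st.2.1, st.2.2)
  (st.1 ++ [inner.1], ([] : List String), inner.2)

-- inner loop of A: appends one numbered entry per element of l
theorem pv_inner (l : List Int) (row : List String) (i : Int) :
    l.foldl (fun (ri : List String × Int) _x => (ri.1 ++ [PySem.Int.toStr ri.2], ri.2 + 1)) (row, i)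
      = (row ++ (List.range l.length).map (fun (c : Nat) => PySem.Int.toStr (i + (c : Int))), i + l.length) := by
  induction l generalizing row i with
  | nil => simp
  | cons a t ih =>
      rw [List.foldl_cons, ih]
      rw [Prod.mk.injEq]
      refine ⟨?_, by push_cast [List.length_cons]; ring⟩
      rw [List.append_assoc]
      congr 1
      rw [List.length_cons, List.range_succ_eq_map, List.map_cons, List.map_map,
        List.singleton_append]
      congr 1
      · norm_num
      · refine List.map_congr_left (fun c _ => ?_)
        simp only [Function.comp_apply]
        congr 1
        push_cast; ring

-- outer loop of A
theorem pv_outer (bx : Int) (l : List Int) (board : List (List String)) (i : Int) :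
    (l.foldl (pvStep bx) (board, [], i)).1
      = board ++ (List.range l.length).map
          (fun (r : Nat) => (List.range (PySem.List.pyRange 0 bx 1).length).map
            (fun (c : Nat) => PySem.Int.toStr (i + (r : Int) * (PySem.List.pyRange 0 bx 1).length + (c : Int)))) := by
  induction l generalizing board i with
  | nil => simp
  | cons a t ih =>
      rw [List.foldl_cons]
      have hstep : pvStep bx (board, [], i) a
          = (board ++ [(List.range (PySem.List.pyRange 0 bx 1).length).map
              (fun (c : Nat) => PySem.Int.toStr (i + (c : Int)))], [],
             i + (PySem.List.pyRange 0 bx 1).length) := by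
        simp [pvStep, pv_inner]
      rw [hstep, ih, List.append_assoc]
      congr 1
      rw [List.length_cons, List.range_succ_eq_map, List.map_cons, List.map_map,
        List.singleton_append]
      congr 1
      · norm_num
      · refine List.map_congr_left (fun r _ => ?_)
        simp only [Function.comp_apply]
        refine List.map_congr_left (fun c _ => ?_)
        congr 1
        push_cast; ring

theorem pv_slice_nil (a b : Int) : PySem.List.slice ([] : List String) (some a) (some b) = [] := by
  simp [PySem.List.slice]

-- B's row r is the r-th chunk of the flat list
theorem pv_slice_row (M N r : Nat) (hr : r < N) :
    PySem.List.slice ((List.range (M * N)).map (fun (k : Nat) => PySem.Int.toStr (k : Int)))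
        (some ((r * M : Nat) : Int)) (some (((r * M : Nat) : Int) + ((M : Nat) : Int)))
      = (List.range M).map (fun (c : Nat) => PySem.Int.toStr ((r * M + c : Nat) : Int)) := by
  rw [PySem.List.slice_natCast_add]
  have hlen : r * M + M ≤ M * N := by
    have : (r + 1) * M ≤ N * M := Nat.mul_le_mul_right M hr
    nlinarith
  apply List.ext_getElem
  · simp; omega
  · intro c h1 h2
    simp only [List.getElem_take, List.getElem_drop, List.getElem_map, List.getElem_range]

-- ===== VERDICT (by name: the statement is the Claim_ definition above) =====
theorem generate_board_spec : Claim_equal_generate_board := by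
  intro bx bY _
  show generate_board bx bY = generate_board_alt bx bY
  by_cases hy : bY ≤ 0
  · have h0 : max bY 0 = 0 := max_eq_right hy
    simp [generate_board, generate_board_alt, h0, PySem.List.pyRange_one_eq_nil hy,
      PySem.List.pyRange_one_eq_nil (le_refl (0 : Int))]
  have hy' : 0 < bY := lt_of_not_ge hy
  have hA : generate_board bx bY
      = (List.range (PySem.List.pyRange 0 bY 1).length).map
          (fun (r : Nat) => (List.range (PySem.List.pyRange 0 bx 1).length).map
            (fun (c : Nat) => PySem.Int.toStr (0 + (r : Int) * (PySem.List.pyRange 0 bx 1).length + (c : Int)))) := by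
    show ((PySem.List.pyRange 0 bY 1).foldl (pvStep bx) ([], [], 0)).1 = _
    rw [pv_outer]; rfl
  by_cases hx : bx ≤ 0
  · -- board_size_x ≤ 0 : every row is empty on both sides
    have hcols : max bx 0 = 0 := max_eq_right hx
    have hrows : max bY 0 = bY := max_eq_left (le_of_lt hy')
    have hxr : PySem.List.pyRange 0 bx 1 = [] := PySem.List.pyRange_one_eq_nil hx
    rw [hA]
    simp only [generate_board_alt, hcols, hrows, mul_zero,
      PySem.List.pyRange_one_eq_nil (le_refl (0 : Int)), hxr, List.map_nil, List.length_nil,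
      List.range_zero, pv_slice_nil]
    rw [List.map_const', List.map_const']
    congr 1
    rw [PySem.List.length_pyRange_one, List.length_range]
  · have hx' : 0 < bx := lt_of_not_ge hx
    obtain ⟨M, rfl⟩ : ∃ M : Nat, bx = (M : Int) :=
      ⟨bx.toNat, (Int.toNat_of_nonneg (le_of_lt hx')).symm⟩
    obtain ⟨N, rfl⟩ : ∃ N : Nat, bY = (N : Int) :=
      ⟨bY.toNat, (Int.toNat_of_nonneg (le_of_lt hy')).symm⟩
    rw [hA]
    simp only [generate_board_alt, max_eq_left (Int.natCast_nonneg M),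
      max_eq_left (Int.natCast_nonneg N)]
    rw [show ((N : Int) * (M : Int)) = ((M * N : Nat) : Int) by push_cast; ring,
      PySem.List.pyRange_one 0 ((M * N : Nat) : Int), PySem.List.pyRange_one 0 (N : Int)]
    simp only [sub_zero, Int.toNat_natCast, zero_add, List.map_map, Function.comp_def]
    have hlenM : (PySem.List.pyRange 0 (M : Int) 1).length = M := by
      rw [PySem.List.length_pyRange_one]; simp
    rw [hlenM]
    simp only [List.length_map, List.length_range]
    refine List.map_congr_left (fun r hr => ?_)
    have hrN : r < N := List.mem_range.mp hr
    have hb1 : ((r : Int) * (M : Int)) = ((r * M : Nat) : Int) := by push_cast; ring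
    rw [hb1, pv_slice_row M N r hrN]
    refine (List.map_congr_left (fun c _ => ?_)).symm
    congr 1
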